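-- pv_equiv track=rewrite | github.com/meta-introspector/retro-sync | fixtures/scripts/classical_baseline.py | cl15_grade
-- ===== SOURCE A (Python) =====
-- def cl15_grade(ivs):
--     mv = {0: 1}
--     for iv in ivs[:500]:
--         idx = abs(iv) % 15
--         blade = 1 << idx
--         new = {}
--         for mask, coeff in mv.items():
--             result = mask ^ blade
--             sign = 1
--             for bit in range(idx):
--                 if mask & (1 << bit): sign *= -1
--             new[result] = new.get(result, 0) + coeff * sign
--         mv = {k: v for k, v in new.items() if v != 0}
--     if not mv: return 0
--     return bin(max(mv.keys(), key=lambda k: abs(mv[k]))).count('1')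
-- ===== SOURCE B (Python) =====
-- def cl15_grade(ivs):
--     m = 0
--     for iv in ivs[:500]:
--         m ^= 1 << (abs(iv) % 15)
--     return bin(m).count('1')
-- ===== Notes on version B (the rewrite author's own statement) =====
-- stated objective: simpler
-- what changed: B exploits that the multivector always stays a singleton with a nonzero (sign-only) coefficient, so the surviving mask is just the XOR of the blade bits: a single integer accumulator replaces all dict construction and the inner sign loop, and the popcount is unaffected.
import Mathlib
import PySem

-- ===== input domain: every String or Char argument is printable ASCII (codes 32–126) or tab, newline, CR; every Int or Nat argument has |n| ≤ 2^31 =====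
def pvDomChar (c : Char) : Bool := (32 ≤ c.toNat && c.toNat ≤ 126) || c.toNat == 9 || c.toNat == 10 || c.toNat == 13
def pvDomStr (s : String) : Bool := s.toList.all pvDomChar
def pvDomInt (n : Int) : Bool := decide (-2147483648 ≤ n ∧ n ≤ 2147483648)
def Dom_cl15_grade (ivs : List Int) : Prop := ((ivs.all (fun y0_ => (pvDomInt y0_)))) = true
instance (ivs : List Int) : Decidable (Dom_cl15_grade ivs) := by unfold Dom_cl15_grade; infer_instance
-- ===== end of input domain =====

-- B: the multivector stays a singleton with a nonzero coefficient, so a single XOR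
-- accumulator replaces the dict and sign bookkeeping (popcount of the final mask is unchanged).

-- ===== PORT A =====
-- loop body of A's outer 'for iv in ivs[:500]'
def loopA (mv : PySem.Dict Int Int) (iv : Int) : PySem.Dict Int Int :=
  let idx : Int := PySem.Int.mod |iv| 15
  let blade : Int := (1 : Int) <<< idx.toNat  -- idx = abs(iv) % 15 ≥ 0, so .toNat is exact
  let new := mv.items.foldl (fun (new : PySem.Dict Int Int) mc =>
    let result := PySem.Int.bxor mc.1 blade
    let sign := (PySem.List.pyRange 0 idx 1).foldl (fun sign bit =>
      -- bit ∈ range(idx) is ≥ 0, so .toNat is exact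
      if PySem.Int.band mc.1 ((1 : Int) <<< bit.toNat) ≠ 0 then sign * -1 else sign) 1
    new.insert result (new.getD result 0 + mc.2 * sign)) PySem.Dict.empty
  PySem.Dict.mk (new.items.filter (fun kv => kv.2 != 0))

def cl15_grade (ivs : List Int) : Int :=
  let mv : PySem.Dict Int Int := PySem.Dict.ofList [(0, 1)]
  let mv := (PySem.List.slice ivs none (some 500)).foldl loopA mv
  if mv.items = [] then 0
  else
    match PySem.List.max? mv.keys (fun k => |mv.getD k 0|) with
    | some k => PySem.Str.count (PySem.Int.pyBin k) "1"
    | none => 0  -- unreachable: mv.items ≠ []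

-- ===== PORT B =====
def loopB (m iv : Int) : Int :=
  PySem.Int.bxor m ((1 : Int) <<< (PySem.Int.mod |iv| 15).toNat)

def cl15_grade_alt (ivs : List Int) : Int :=
  let m := (PySem.List.slice ivs none (some 500)).foldl loopB 0
  PySem.Str.count (PySem.Int.pyBin m) "1"

-- ===== PRECONDITION & SPEC =====
def Spec_cl15_grade (ivs : List Int) (out : Int) : Prop := out = cl15_grade_alt ivs
instance (ivs : List Int) (out : Int) : Decidable (Spec_cl15_grade ivs out) := by unfold Spec_cl15_grade; infer_instance

-- ===== CLAIM (what is proved, stated in full; the proofs are below) =====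
def Claim_equal_cl15_grade : Prop := ∀ (ivs : List Int), Dom_cl15_grade ivs → Spec_cl15_grade ivs (cl15_grade ivs)

-- ===== LEMMAS AND PROOFS =====

lemma pvSignNeZero (l : List Int) (mask : Int) : ∀ s : Int, s ≠ 0 →
    l.foldl (fun sign bit =>
      if PySem.Int.band mask ((1 : Int) <<< bit.toNat) ≠ 0 then sign * -1 else sign) s ≠ 0 := by
  induction l with
  | nil => intro s hs; simpa using hs
  | cons b t ih =>
      intro s hs
      simp only [List.foldl_cons]
      split
      · exact ih _ (by simpa using hs)
      · exact ih _ hs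

lemma loopA_singleton (m c iv : Int) (hc : c ≠ 0) :
    ∃ c', c' ≠ 0 ∧
      loopA (PySem.Dict.mk [(m, c)]) iv =
        PySem.Dict.mk [(PySem.Int.bxor m ((1 : Int) <<< (PySem.Int.mod |iv| 15).toNat), c')] := by
  simp only [loopA, List.foldl_cons, List.foldl_nil]
  generalize hS : List.foldl _ (1 : Int) (PySem.List.pyRange 0 (PySem.Int.mod |iv| 15)) = S
  have hS0 : S ≠ 0 := by rw [← hS]; exact pvSignNeZero _ m 1 one_ne_zero
  have hcs : c * S ≠ 0 := mul_ne_zero hc hS0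
  refine ⟨c * S, hcs, ?_⟩
  simp [PySem.Dict.insert, PySem.Dict.getD, PySem.Dict.get?, PySem.Dict.empty,
    PySem.Dict.contains, List.filter, hcs]

lemma fold_inv (l : List Int) : ∀ m c : Int, c ≠ 0 →
    ∃ c', c' ≠ 0 ∧
      l.foldl loopA (PySem.Dict.mk [(m, c)]) =
        PySem.Dict.mk [(l.foldl loopB m, c')] := by
  induction l with
  | nil => intro m c hc; exact ⟨c, hc, rfl⟩
  | cons iv t ih =>
      intro m c hc
      obtain ⟨c1, hc1, h1⟩ := loopA_singleton m c iv hc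
      obtain ⟨c', hc', h'⟩ := ih (PySem.Int.bxor m ((1 : Int) <<< (PySem.Int.mod |iv| 15).toNat)) c1 hc1
      refine ⟨c', hc', ?_⟩
      simpa [loopB, h1] using h'

-- ===== VERDICT (by name: the statement is the Claim_ definition above) =====
theorem cl15_grade_spec : Claim_equal_cl15_grade := by
  intro ivs _
  unfold Spec_cl15_grade cl15_grade cl15_grade_alt
  obtain ⟨c', hc', h⟩ := fold_inv (PySem.List.slice ivs none (some 500)) 0 1 one_ne_zero
  have hofl : PySem.Dict.ofList [((0 : Int), (1 : Int))] = PySem.Dict.mk [(0, 1)] := by decide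
  rw [hofl]
  simp only [h]
  simp [PySem.Dict.keys, PySem.Dict.getD, PySem.Dict.get?,
    PySem.List.max?]
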